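-- pv_equiv track=rewrite | github.com/kelvinblaser/EulerProject | Euler926.py | _convolve_roundness_distributions
-- ===== SOURCE A (Python) =====
-- import collections
-- from collections.abc import Collection, Mapping
--
-- MOD = 10**9 + 7
--
-- def _convolve_roundness_distributions(dist1: Mapping[int, int], dist2: Mapping[int, int], /) -> Mapping[int, int]:
--     """Returns the (almost) convolution of two distributions.
--
--     In a normal convolution, (key1, key2) contribute to key1 + key2 or key1 - key2.
--     For roundness though, (key1, key2) contributes to min(key1, key2).
--     """
--     # We can use a two pointer approach to do the convolution.
--     # For some r1, if we know the sum of the dist2[r2] where r1 <= r2, then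
--     # we don't have to multiply and add for each r2 >= r1, we can just multiply
--     # and add the cumulative value.
--     #
--     # Likewise for a given r2, we can sum up for all r1 >= r2.
--     #
--     # So the trick here is to do both of these, and take care that we don't
--     # double count when r1 == r2.
--     convolved: dict[int, int] = collections.defaultdict(int)
--     keys1 = sorted(dist1.keys())
--     keys2 = sorted(dist2.keys())
--     # The cumulative lists will be indexed parallel to the keys lists.
--     cumulative1 = [0] * (len(keys1) + 1)
--     for ix, r1 in enumerate(keys1):
--         cumulative1[ix+1] = cumulative1[ix] + dist1[r1]
--     cumulative2 = [0] * (len(keys2) + 1)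
--     for ix, r2 in enumerate(keys2):
--         cumulative2[ix+1] = cumulative2[ix] + dist2[r2]
--     total1 = cumulative1[-1]
--     total2 = cumulative2[-1]
--
--     ix1, ix2 = 0, 0
--     while ix1 < len(keys1) and ix2 < len(keys2):
--         # Process values
--         r1, r2 = keys1[ix1], keys2[ix2]
--         if r1 <= r2:
--             convolved[r1] += dist1[r1] * (total2 - cumulative2[ix2])
--         if r1 >= r2:
--             convolved[r2] += (total1 - cumulative1[ix1]) * dist2[r2]
--         if r1 == r2:
--             # Oops, we double counted.
--             convolved[r1] -= dist1[r1] * dist2[r2]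
--         # Update indices
--         if r1 <= r2:
--             ix1 += 1
--         if r1 >= r2:
--             ix2 += 1
--     for r in convolved.keys():
--         convolved[r] %= MOD
--     return convolved
-- ===== SOURCE B (Python) =====
-- import collections
--
-- MOD = 10**9 + 7
--
-- def _convolve_roundness_distributions(dist1, dist2, /):
--     """Direct min-convolution: every pair (r1, r2) contributes v1*v2 to the
--     bucket min(r1, r2); buckets are then emitted in sorted key order mod MOD."""
--     acc = collections.defaultdict(int)
--     for r1, v1 in dist1.items():
--         for r2, v2 in dist2.items():
--             acc[min(r1, r2)] += v1 * v2
--     convolved = collections.defaultdict(int)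
--     for r in sorted(acc):
--         convolved[r] = acc[r] % MOD
--     return convolved
-- ===== Notes on version B (the rewrite author's own statement) =====
-- stated objective: simpler
-- what changed: Replaces the sorted-keys + prefix-sum + two-pointer merge (with its double-count correction) by a direct min-convolution: one double loop adds v1*v2 into the bucket min(r1,r2) of a defaultdict, which is then emitted in sorted key order mod MOD.
import Mathlib
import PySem

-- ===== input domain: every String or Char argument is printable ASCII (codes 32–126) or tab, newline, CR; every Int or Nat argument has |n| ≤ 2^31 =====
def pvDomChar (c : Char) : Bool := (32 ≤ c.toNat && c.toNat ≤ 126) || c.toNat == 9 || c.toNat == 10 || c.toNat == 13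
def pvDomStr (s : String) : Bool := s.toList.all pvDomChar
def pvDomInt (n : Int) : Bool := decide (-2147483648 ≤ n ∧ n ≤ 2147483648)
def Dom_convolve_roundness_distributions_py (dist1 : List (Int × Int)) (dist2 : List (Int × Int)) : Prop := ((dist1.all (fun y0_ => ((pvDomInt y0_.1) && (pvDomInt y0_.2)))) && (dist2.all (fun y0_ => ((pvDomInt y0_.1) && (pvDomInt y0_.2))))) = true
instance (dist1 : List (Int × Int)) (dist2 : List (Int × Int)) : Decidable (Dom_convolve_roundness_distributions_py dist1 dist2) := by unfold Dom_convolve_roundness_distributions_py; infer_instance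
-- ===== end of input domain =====

-- B replaces A's sorted-keys + prefix-sum + two-pointer merge by a direct min-convolution: one double
-- loop adds v1*v2 into the bucket min(r1,r2), emitted in sorted key order mod MOD; objective: simpler.

-- ===== PORT A =====
def pyMOD : Int := 1000000007

-- cumulative[ix+1] = cumulative[ix] + dist[r]  over enumerate(keys); indices are in range, so
-- pyGetD/pySetD are exact, and dist[r] with r a key of dist is exactly d.getD r 0.
def cumArr (d : PySem.Dict Int Int) (keys : List Int) : List Int :=
  (PySem.List.enumerate keys).foldl
    (fun c p => PySem.List.pySetD c (p.1 + 1) (PySem.List.pyGetD c p.1 0 + d.getD p.2 0))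
    (List.replicate (keys.length + 1) (0 : Int))

-- the while loop of A; keys1[ix1]/keys2[ix2]/cum[ix] are in range whenever read, so getD/pyGetD are exact;
-- defaultdict's `convolved[r] += x` is exactly `modify r 0 (· + x)`.
def loopA (d1 d2 : PySem.Dict Int Int) (keys1 keys2 cum1 cum2 : List Int)
    (total1 total2 : Int) (ix1 ix2 : Nat) (conv : PySem.Dict Int Int) : PySem.Dict Int Int :=
  if _h : ix1 < keys1.length ∧ ix2 < keys2.length then
    let r1 := keys1.getD ix1 0
    let r2 := keys2.getD ix2 0
    let conv1 := if r1 ≤ r2 then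
        conv.modify r1 0 (fun v => v + d1.getD r1 0 * (total2 - PySem.List.pyGetD cum2 (ix2 : Int) 0))
      else conv
    let conv2 := if r2 ≤ r1 then
        conv1.modify r2 0 (fun v => v + (total1 - PySem.List.pyGetD cum1 (ix1 : Int) 0) * d2.getD r2 0)
      else conv1
    let conv3 := if r1 = r2 then
        conv2.modify r1 0 (fun v => v - d1.getD r1 0 * d2.getD r2 0)
      else conv2
    loopA d1 d2 keys1 keys2 cum1 cum2 total1 total2
      (if r1 ≤ r2 then ix1 + 1 else ix1) (if r2 ≤ r1 then ix2 + 1 else ix2) conv3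
  else conv
termination_by (keys1.length - ix1) + (keys2.length - ix2)
decreasing_by split_ifs <;> omega

def convolve_roundness_distributions_py (dist1 : List (Int × Int)) (dist2 : List (Int × Int)) : List (Int × Int) :=
  let d1 := PySem.Dict.ofList dist1
  let d2 := PySem.Dict.ofList dist2
  let keys1 := PySem.List.sorted d1.keys (fun x => x)
  let keys2 := PySem.List.sorted d2.keys (fun x => x)
  let cumulative1 := cumArr d1 keys1
  let cumulative2 := cumArr d2 keys2
  let total1 := PySem.List.pyGetD cumulative1 (-1) 0   -- cumulative1[-1]; the list is nonempty
  let total2 := PySem.List.pyGetD cumulative2 (-1) 0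
  let convolved := loopA d1 d2 keys1 keys2 cumulative1 cumulative2 total1 total2 0 0 PySem.Dict.empty
  -- for r in convolved.keys(): convolved[r] %= MOD   (r is present, so modify r 0 is exact)
  (convolved.keys.foldl (fun c r => c.modify r 0 (fun v => PySem.Int.mod v pyMOD)) convolved).items

-- ===== PORT B =====
def convolve_roundness_distributions_py_alt (dist1 : List (Int × Int)) (dist2 : List (Int × Int)) : List (Int × Int) :=
  let d1 := PySem.Dict.ofList dist1
  let d2 := PySem.Dict.ofList dist2
  -- acc[min(r1, r2)] += v1 * v2 over all pairs
  let acc := d1.items.foldl (fun acc p1 =>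
      d2.items.foldl (fun acc p2 => acc.modify (min p1.1 p2.1) 0 (fun v => v + p1.2 * p2.2)) acc)
    PySem.Dict.empty
  -- for r in sorted(acc): convolved[r] = acc[r] % MOD
  ((PySem.List.sorted acc.keys (fun x => x)).foldl
      (fun conv r => conv.insert r (PySem.Int.mod (acc.getD r 0) pyMOD)) PySem.Dict.empty).items

-- ===== PRECONDITION & SPEC =====
def Spec_convolve_roundness_distributions_py (dist1 : List (Int × Int)) (dist2 : List (Int × Int)) (out : List (Int × Int)) : Prop := out = convolve_roundness_distributions_py_alt dist1 dist2
instance (dist1 : List (Int × Int)) (dist2 : List (Int × Int)) (out : List (Int × Int)) : Decidable (Spec_convolve_roundness_distributions_py dist1 dist2 out) := by unfold Spec_convolve_roundness_distributions_py; infer_instance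

-- ===== CLAIM (what is proved, stated in full; the proofs are below) =====
def Claim_equal_convolve_roundness_distributions_py : Prop := ∀ (dist1 : List (Int × Int)) (dist2 : List (Int × Int)), Dom_convolve_roundness_distributions_py dist1 dist2 → Spec_convolve_roundness_distributions_py dist1 dist2 (convolve_roundness_distributions_py dist1 dist2)

-- ===== LEMMAS AND PROOFS =====

-- sum of the values of d over a list of keys
def sumW (d : PySem.Dict Int Int) (l : List Int) : Int := (l.map (fun k => d.getD k 0)).sum

-- the (pre-mod) value A accumulates at key r
def Fraw (d1 d2 : PySem.Dict Int Int) (r : Int) : Int :=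
  (if d1.contains r then d1.getD r 0 * sumW d2 (d2.keys.filter (fun k => r ≤ k)) else 0)
  + (if d2.contains r then sumW d1 (d1.keys.filter (fun k => r ≤ k)) * d2.getD r 0 else 0)
  - (if d1.contains r && d2.contains r then d1.getD r 0 * d2.getD r 0 else 0)

-- the key sequence A's two-pointer merge emits
def mergeOut : List Int → List Int → List Int
  | [], _ => []
  | _ :: _, [] => []
  | a :: as, b :: bs =>
    if a < b then a :: mergeOut as (b :: bs)
    else if b < a then b :: mergeOut (a :: as) bs
    else a :: mergeOut as bs
termination_by l1 l2 => l1.length + l2.length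


@[simp] lemma sumW_nil (d : PySem.Dict Int Int) : sumW d [] = 0 := rfl
@[simp] lemma sumW_cons (d : PySem.Dict Int Int) (k : Int) (l : List Int) :
    sumW d (k :: l) = d.getD k 0 + sumW d l := by simp [sumW]

lemma getD_set' (c : List Int) (m j : Nat) (v : Int) (hm : m < c.length) :
    (c.set m v).getD j 0 = if j = m then v else c.getD j 0 := by
  by_cases hj : j < c.length
  · rw [List.getD_eq_getElem _ _ (by simpa using hj), List.getElem_set]
    split_ifs with h1 h2 h3 <;> try rfl
    · exact absurd h1.symm h2
    · exact absurd h3.symm h1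
    · rw [List.getD_eq_getElem _ _ hj]
  · have h : c.length ≤ j := by omega
    rw [List.getD_eq_default _ _ (by simpa using h), List.getD_eq_default _ _ h, if_neg (by omega)]

lemma pyGetD_neg_one (xs : List Int) (h : xs ≠ []) :
    PySem.List.pyGetD xs (-1) 0 = xs.getD (xs.length - 1) 0 := by
  have hl : 1 ≤ xs.length := List.length_pos_iff.mpr h
  simp [PySem.List.pyGetD, PySem.List.pyGet?, PySem.List.pyIdx?, hl, List.getD]

lemma pySetD_natCast (xs : List Int) (n : Nat) (v : Int) (h : n < xs.length) :
    PySem.List.pySetD xs (n : Int) v = xs.set n v := by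
  simp [PySem.List.pySetD, PySem.List.pySet?_natCast _ _ _ h]

lemma nodup_of_pairwise_lt (l : List Int) (h : l.Pairwise (· < ·)) : l.Nodup :=
  h.imp (fun hab => ne_of_lt hab)


lemma getD_lt_getD (l : List Int) (hp : l.Pairwise (· < ·)) (i j : Nat) (hij : i < j)
    (hj : j < l.length) : l.getD i 0 < l.getD j 0 := by
  rw [List.getD_eq_getElem _ _ (by omega), List.getD_eq_getElem _ _ hj]
  exact List.pairwise_iff_getElem.mp hp i j (by omega) hj hij

lemma mem_take_exists (l : List Int) (n : Nat) (y : Int) (hy : y ∈ l.take n) :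
    ∃ j, ∃ _hj : j < l.length, j < n ∧ l.getD j 0 = y := by
  rw [List.mem_iff_getElem] at hy
  obtain ⟨j, hj, he⟩ := hy
  have hj1 : j < l.length := by simp at hj; omega
  have hj2 : j < n := by simp at hj; omega
  refine ⟨j, hj1, hj2, ?_⟩
  rw [List.getD_eq_getElem _ _ hj1, ← he, List.getElem_take]

lemma getD_le_of_mem_drop (l : List Int) (hp : l.Pairwise (· < ·)) (i : Nat) (hi : i < l.length)
    (y : Int) (hy : y ∈ l.drop i) : l.getD i 0 ≤ y := by
  rw [List.mem_iff_getElem] at hy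
  obtain ⟨j, hj, he⟩ := hy
  have hj1 : i + j < l.length := by simp at hj; omega
  rw [List.getElem_drop] at he
  rcases Nat.eq_zero_or_pos j with h0 | h0
  · subst h0
    rw [List.getD_eq_getElem _ _ hi, ← he]
    simp
  · have := getD_lt_getD l hp i (i + j) (by omega) hj1
    rw [List.getD_eq_getElem _ _ hj1] at this
    omega

lemma contains_false_of_not_mem (c : PySem.Dict Int Int) (r : Int) (h : r ∉ c.keys) :
    c.contains r = false := by
  rcases hb : c.contains r
  · rfl
  · exact absurd ((PySem.Dict.contains_iff_mem_keys c r).mp hb) h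

-- defaultdict `conv[r] += x` on a fresh key appends
lemma modify_fresh (c : PySem.Dict Int Int) (r x : Int) (hnd : c.keys.Nodup)
    (hcf : c.contains r = false) :
    (c.modify r 0 (fun v => v + x)).keys = c.keys ++ [r]
    ∧ (c.modify r 0 (fun v => v + x)).items = c.items ++ [(r, x)] := by
  have hk : (c.modify r 0 (fun v => v + x)).keys = c.keys ++ [r] := by
    rw [PySem.Dict.keys_modify, PySem.Dict.keys_insert_of_not_contains _ _ hcf]
  have hnd' : (c.keys ++ [r]).Nodup := by
    refine List.Nodup.append hnd (List.nodup_singleton r) ?_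
    intro a ha hb
    rw [List.mem_singleton] at hb
    subst hb
    exact absurd ((PySem.Dict.contains_iff_mem_keys c a).mpr ha) (by simp [hcf])
  refine ⟨hk, ?_⟩
  have hmodnd : (c.modify r 0 (fun v => v + x)).keys.Nodup := by rw [hk]; exact hnd'
  rw [PySem.Dict.items_eq_map_keys _ hmodnd 0, hk, List.map_append,
      PySem.Dict.items_eq_map_keys c hnd 0]
  congr 1
  · apply List.map_congr_left
    intro k hkmem
    rw [PySem.Dict.getD_modify, if_neg]
    intro hkr
    subst hkr
    exact absurd ((PySem.Dict.contains_iff_mem_keys c k).mpr hkmem) (by simp [hcf])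
  · simp only [List.map_cons, List.map_nil]
    rw [PySem.Dict.getD_modify, if_pos rfl, PySem.Dict.getD_of_not_contains _ _ hcf, zero_add]

-- modify at an already-present key rewrites that entry in place
lemma modify_present (c : PySem.Dict Int Int) (r : Int) (f : Int → Int) (hnd : c.keys.Nodup)
    (hct : c.contains r = true) :
    (c.modify r 0 f).keys = c.keys
    ∧ (c.modify r 0 f).items = c.items.map (fun p => if p.1 = r then (p.1, f p.2) else p) := by
  have hk : (c.modify r 0 f).keys = c.keys := by
    rw [PySem.Dict.keys_modify, PySem.Dict.keys_insert_of_contains _ _ hct]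
  refine ⟨hk, ?_⟩
  have hmodnd : (c.modify r 0 f).keys.Nodup := by rw [hk]; exact hnd
  rw [PySem.Dict.items_eq_map_keys _ hmodnd 0, hk, PySem.Dict.items_eq_map_keys c hnd 0,
      List.map_map]
  apply List.map_congr_left
  intro k hkmem
  simp only [Function.comp_apply]
  rw [PySem.Dict.getD_modify]
  split_ifs with h1 <;> simp_all

lemma cumfold_getD (d : PySem.Dict Int Int) (l : List Int) : ∀ (s : Nat) (c : List Int),
    s + l.length < c.length →
    ∀ i : Nat, i < c.length →
    ((PySem.List.enumerate l (s : Int)).foldl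
        (fun c p => PySem.List.pySetD c (p.1 + 1) (PySem.List.pyGetD c p.1 0 + d.getD p.2 0)) c).getD i 0
      = if s < i ∧ i ≤ s + l.length then c.getD s 0 + sumW d (l.take (i - s)) else c.getD i 0 := by
  induction l with
  | nil =>
    intro s c _hlen i _hi
    rw [PySem.List.enumerate_nil]
    simp only [List.foldl_nil, List.length_nil]
    rw [if_neg (by omega)]
  | cons x xs ih =>
    intro s c hlen i hi
    rw [PySem.List.enumerate_cons, List.foldl_cons]
    simp only [List.length_cons] at hlen
    have hs1 : s + 1 < c.length := by omega
    have hcast : ((s : Int) + 1) = ((s + 1 : Nat) : Int) := by push_cast; ring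
    have hset : PySem.List.pySetD c (((s + 1 : Nat)) : Int) (PySem.List.pyGetD c (s : Int) 0 + d.getD x 0)
        = c.set (s + 1) (c.getD s 0 + d.getD x 0) := by
      rw [PySem.List.pyGetD_natCast, pySetD_natCast _ _ _ hs1]
    simp only [hcast]
    rw [hset]
    rw [ih (s + 1) _ (by simpa using (by omega : (s+1) + xs.length < c.length)) i
        (by simpa using hi)]
    have hw : (c.set (s + 1) (c.getD s 0 + d.getD x 0)).getD (s+1) 0 = c.getD s 0 + d.getD x 0 := by
      rw [getD_set' _ _ _ _ hs1, if_pos rfl]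
    simp only [List.length_cons]
    by_cases h1 : i ≤ s
    · rw [if_neg (by omega), if_neg (by omega), getD_set' _ _ _ _ hs1, if_neg (by omega)]
    · by_cases h2 : i = s + 1
      · subst h2
        rw [if_neg (by omega), if_pos (by omega), hw]
        have ht : s + 1 - s = 1 := by omega
        rw [ht]
        simp [sumW]
      · by_cases h3 : i ≤ s + 1 + xs.length
        · rw [if_pos (by omega), if_pos (by omega), hw]
          have ht : i - s = (i - (s+1)) + 1 := by omega
          rw [ht, List.take_succ_cons, sumW_cons]
          ring
        · rw [if_neg (by omega), if_neg (by omega), getD_set' _ _ _ _ hs1, if_neg (by omega)]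

@[simp] lemma sumW_append (d : PySem.Dict Int Int) (l1 l2 : List Int) :
    sumW d (l1 ++ l2) = sumW d l1 + sumW d l2 := by simp [sumW]

lemma cumArr_length (d : PySem.Dict Int Int) (ks : List Int) :
    (cumArr d ks).length = ks.length + 1 := by
  unfold cumArr
  suffices h : ∀ (l : List (Int × Int)) (c : List Int),
      (l.foldl (fun c p => PySem.List.pySetD c (p.1 + 1) (PySem.List.pyGetD c p.1 0 + d.getD p.2 0)) c).length
        = c.length by
    rw [h]; simp
  intro l
  induction l with
  | nil => intro c; rfl
  | cons p t ih => intro c; rw [List.foldl_cons, ih, PySem.List.length_pySetD]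

lemma cumArr_getD (d : PySem.Dict Int Int) (ks : List Int) (i : Nat) (hi : i ≤ ks.length) :
    (cumArr d ks).getD i 0 = sumW d (ks.take i) := by
  have h := cumfold_getD d ks 0 (List.replicate (ks.length + 1) (0 : Int)) (by simp) i
    (by simp; omega)
  simp only [Nat.cast_zero] at h
  unfold cumArr
  rw [h]
  rcases Nat.eq_zero_or_pos i with h0 | h0
  · subst h0
    rw [if_neg (by omega)]
    simp
  · rw [if_pos (by omega)]
    simp

lemma cumArr_suffix (d : PySem.Dict Int Int) (ks : List Int) (i : Nat) (hi : i ≤ ks.length) :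
    PySem.List.pyGetD (cumArr d ks) (-1) 0 - PySem.List.pyGetD (cumArr d ks) (i : Int) 0
      = sumW d (ks.drop i) := by
  have hne : cumArr d ks ≠ [] := by
    have := cumArr_length d ks
    intro h; rw [h] at this; simp at this
  rw [pyGetD_neg_one _ hne, PySem.List.pyGetD_natCast, cumArr_length,
      Nat.add_sub_cancel, cumArr_getD d ks ks.length (le_refl _), cumArr_getD d ks i hi,
      List.take_length]
  have h := sumW_append d (ks.take i) (ks.drop i)
  rw [List.take_append_drop] at h
  omega

lemma mergeOut_src (l1 l2 : List Int) : ∀ r ∈ mergeOut l1 l2, ∃ a ∈ l1, ∃ b ∈ l2, min a b = r := by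
  fun_induction mergeOut l1 l2 with
  | case1 l2 => simp
  | case2 a as => simp
  | case3 a as b bs hab ih =>
    intro r hr
    rcases List.mem_cons.mp hr with h | h
    · exact ⟨a, List.mem_cons_self, b, List.mem_cons_self, by omega⟩
    · obtain ⟨a', ha, b', hb, hm⟩ := ih r h
      exact ⟨a', List.mem_cons_of_mem _ ha, b', hb, hm⟩
  | case4 a as b bs hab hba ih =>
    intro r hr
    rcases List.mem_cons.mp hr with h | h
    · exact ⟨a, List.mem_cons_self, b, List.mem_cons_self, by omega⟩
    · obtain ⟨a', ha, b', hb, hm⟩ := ih r h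
      exact ⟨a', ha, b', List.mem_cons_of_mem _ hb, hm⟩
  | case5 a as b bs hab hba ih =>
    intro r hr
    rcases List.mem_cons.mp hr with h | h
    · exact ⟨a, List.mem_cons_self, b, List.mem_cons_self, by omega⟩
    · obtain ⟨a', ha, b', hb, hm⟩ := ih r h
      exact ⟨a', List.mem_cons_of_mem _ ha, b', List.mem_cons_of_mem _ hb, hm⟩

lemma mergeOut_pairwise (l1 l2 : List Int) (h1 : l1.Pairwise (· < ·)) (h2 : l2.Pairwise (· < ·)) :
    (mergeOut l1 l2).Pairwise (· < ·) := by
  revert h1 h2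
  fun_induction mergeOut l1 l2 with
  | case1 l2 => intro _ _; simp
  | case2 a as => intro _ _; simp
  | case3 a as b bs hab ih =>
    intro h1 h2
    rw [List.pairwise_cons] at h1
    refine List.Pairwise.cons ?_ (ih h1.2 h2)
    intro r hr
    obtain ⟨a', ha, b', hb, hm⟩ := mergeOut_src _ _ r hr
    have hb' : b ≤ b' := by
      rcases List.mem_cons.mp hb with h | h
      · omega
      · have := (List.pairwise_cons.mp h2).1 b' h; omega
    have ha' : a < a' := h1.1 a' ha
    omega
  | case4 a as b bs hab hba ih =>
    intro h1 h2
    rw [List.pairwise_cons] at h2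
    refine List.Pairwise.cons ?_ (ih h1 h2.2)
    intro r hr
    obtain ⟨a', ha, b', hb, hm⟩ := mergeOut_src _ _ r hr
    have ha' : a ≤ a' := by
      rcases List.mem_cons.mp ha with h | h
      · omega
      · have := (List.pairwise_cons.mp h1).1 a' h; omega
    have hb' : b < b' := h2.1 b' hb
    omega
  | case5 a as b bs hab hba ih =>
    intro h1 h2
    rw [List.pairwise_cons] at h1
    rw [List.pairwise_cons] at h2
    refine List.Pairwise.cons ?_ (ih h1.2 h2.2)
    intro r hr
    obtain ⟨a', ha, b', hb, hm⟩ := mergeOut_src _ _ r hr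
    have ha' : a < a' := h1.1 a' ha
    have hb' : b < b' := h2.1 b' hb
    omega

lemma mem_mergeOut (l1 l2 : List Int) (r : Int) :
    l1.Pairwise (· < ·) → l2.Pairwise (· < ·) →
    (r ∈ mergeOut l1 l2 ↔ ∃ a ∈ l1, ∃ b ∈ l2, min a b = r) := by
  fun_induction mergeOut l1 l2 with
  | case1 l2 => intro _ _; simp
  | case2 a as => intro _ _; simp
  | case3 a as b bs hab ih =>
    intro h1 h2
    constructor
    · intro h
      rcases List.mem_cons.mp h with h | h
      · exact ⟨a, List.mem_cons_self, b, List.mem_cons_self, by omega⟩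
      · obtain ⟨a', ha, b', hb, hm⟩ := (ih (List.pairwise_cons.mp h1).2 h2).mp h
        exact ⟨a', List.mem_cons_of_mem _ ha, b', hb, hm⟩
    · rintro ⟨a', ha, b', hb, hm⟩
      rcases List.mem_cons.mp ha with h | h
      · subst h
        have hb' : a' < b' := by
          rcases List.mem_cons.mp hb with h | h
          · omega
          · have := (List.pairwise_cons.mp h2).1 b' h; omega
        have : r = a' := by omega
        subst this; exact List.mem_cons_self
      · refine List.mem_cons_of_mem _ ?_
        exact (ih (List.pairwise_cons.mp h1).2 h2).mpr ⟨a', h, b', hb, hm⟩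
  | case4 a as b bs hab hba ih =>
    intro h1 h2
    constructor
    · intro h
      rcases List.mem_cons.mp h with h | h
      · exact ⟨a, List.mem_cons_self, b, List.mem_cons_self, by omega⟩
      · obtain ⟨a', ha, b', hb, hm⟩ := (ih h1 (List.pairwise_cons.mp h2).2).mp h
        exact ⟨a', ha, b', List.mem_cons_of_mem _ hb, hm⟩
    · rintro ⟨a', ha, b', hb, hm⟩
      rcases List.mem_cons.mp hb with h | h
      · subst h
        have ha' : b' < a' := by
          rcases List.mem_cons.mp ha with h | h
          · omega
          · have := (List.pairwise_cons.mp h1).1 a' h; omega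
        have : r = b' := by omega
        subst this; exact List.mem_cons_self
      · refine List.mem_cons_of_mem _ ?_
        exact (ih h1 (List.pairwise_cons.mp h2).2).mpr ⟨a', ha, b', h, hm⟩
  | case5 a as b bs hab hba ih =>
    intro h1 h2
    have hba' : a = b := by omega
    subst hba'
    constructor
    · intro h
      rcases List.mem_cons.mp h with h | h
      · exact ⟨a, List.mem_cons_self, a, List.mem_cons_self, by omega⟩
      · obtain ⟨a', ha, b', hb, hm⟩ := (ih (List.pairwise_cons.mp h1).2 (List.pairwise_cons.mp h2).2).mp h
        exact ⟨a', List.mem_cons_of_mem _ ha, b', List.mem_cons_of_mem _ hb, hm⟩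
    · rintro ⟨a', ha, b', hb, hm⟩
      rcases List.mem_cons.mp ha with h | h
      · subst h
        have : b' ≥ a' := by
          rcases List.mem_cons.mp hb with h | h
          · omega
          · have := (List.pairwise_cons.mp h2).1 b' h; omega
        have : r = a' := by omega
        subst this; exact List.mem_cons_self
      · rcases List.mem_cons.mp hb with h' | h'
        · subst h'
          have : a' > b' := (List.pairwise_cons.mp h1).1 a' h
          have : r = b' := by omega
          subst this; exact List.mem_cons_self
        · refine List.mem_cons_of_mem _ ?_
          exact (ih (List.pairwise_cons.mp h1).2 (List.pairwise_cons.mp h2).2).mpr ⟨a', h, b', h', hm⟩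

-- equation lemmas for the while loop
lemma loopA_stop (d1 d2 : PySem.Dict Int Int) (k1s k2s c1 c2 : List Int) (t1 t2 : Int)
    (ix1 ix2 : Nat) (conv : PySem.Dict Int Int) (h : ¬(ix1 < k1s.length ∧ ix2 < k2s.length)) :
    loopA d1 d2 k1s k2s c1 c2 t1 t2 ix1 ix2 conv = conv := by
  rw [loopA, dif_neg h]

lemma loopA_step_lt (d1 d2 : PySem.Dict Int Int) (k1s k2s c1 c2 : List Int) (t1 t2 : Int)
    (ix1 ix2 : Nat) (conv : PySem.Dict Int Int) (h : ix1 < k1s.length ∧ ix2 < k2s.length)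
    (hlt : k1s.getD ix1 0 < k2s.getD ix2 0) :
    loopA d1 d2 k1s k2s c1 c2 t1 t2 ix1 ix2 conv
      = loopA d1 d2 k1s k2s c1 c2 t1 t2 (ix1 + 1) ix2
          (conv.modify (k1s.getD ix1 0) 0
            (fun v => v + d1.getD (k1s.getD ix1 0) 0 * (t2 - PySem.List.pyGetD c2 (ix2 : Int) 0))) := by
  conv_lhs => rw [loopA]
  rw [dif_pos h]
  simp only [if_pos hlt.le, if_neg (not_le.mpr hlt), if_neg (ne_of_lt hlt)]

lemma loopA_step_gt (d1 d2 : PySem.Dict Int Int) (k1s k2s c1 c2 : List Int) (t1 t2 : Int)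
    (ix1 ix2 : Nat) (conv : PySem.Dict Int Int) (h : ix1 < k1s.length ∧ ix2 < k2s.length)
    (hgt : k2s.getD ix2 0 < k1s.getD ix1 0) :
    loopA d1 d2 k1s k2s c1 c2 t1 t2 ix1 ix2 conv
      = loopA d1 d2 k1s k2s c1 c2 t1 t2 ix1 (ix2 + 1)
          (conv.modify (k2s.getD ix2 0) 0
            (fun v => v + (t1 - PySem.List.pyGetD c1 (ix1 : Int) 0) * d2.getD (k2s.getD ix2 0) 0)) := by
  conv_lhs => rw [loopA]
  rw [dif_pos h]
  simp only [if_pos hgt.le, if_neg (not_le.mpr hgt), if_neg (ne_of_gt hgt)]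

lemma loopA_step_eq (d1 d2 : PySem.Dict Int Int) (k1s k2s c1 c2 : List Int) (t1 t2 : Int)
    (ix1 ix2 : Nat) (conv : PySem.Dict Int Int) (h : ix1 < k1s.length ∧ ix2 < k2s.length)
    (heq : k1s.getD ix1 0 = k2s.getD ix2 0) :
    loopA d1 d2 k1s k2s c1 c2 t1 t2 ix1 ix2 conv
      = loopA d1 d2 k1s k2s c1 c2 t1 t2 (ix1 + 1) (ix2 + 1)
          ((((conv.modify (k1s.getD ix1 0) 0
              (fun v => v + d1.getD (k1s.getD ix1 0) 0 * (t2 - PySem.List.pyGetD c2 (ix2 : Int) 0))).modify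
              (k2s.getD ix2 0) 0
              (fun v => v + (t1 - PySem.List.pyGetD c1 (ix1 : Int) 0) * d2.getD (k2s.getD ix2 0) 0)).modify
              (k1s.getD ix1 0) 0
              (fun v => v - d1.getD (k1s.getD ix1 0) 0 * d2.getD (k2s.getD ix2 0) 0))) := by
  conv_lhs => rw [loopA]
  rw [dif_pos h]
  simp only [if_pos heq.le, if_pos heq.ge, if_pos heq]

lemma filter_eq_drop (l : List Int) (hp : l.Pairwise (· < ·)) (i : Nat) (hi : i < l.length) (r : Int)
    (htake : ∀ j < i, l.getD j 0 < r) (hhead : r ≤ l.getD i 0) :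
    l.filter (fun k => decide (r ≤ k)) = l.drop i := by
  conv_lhs => rw [← List.take_append_drop i l]
  rw [List.filter_append]
  have h1 : (l.take i).filter (fun k => decide (r ≤ k)) = [] := by
    rw [List.filter_eq_nil_iff]
    intro y hy
    obtain ⟨j, hj, hji, he⟩ := mem_take_exists l i y hy
    have hlt := htake j hji
    rw [he] at hlt
    simp
    omega
  have h2 : (l.drop i).filter (fun k => decide (r ≤ k)) = l.drop i := by
    rw [List.filter_eq_self]
    intro y hy
    have := getD_le_of_mem_drop l hp i hi y hy
    simp
    omega
  rw [h1, h2, List.nil_append]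

lemma sumW_perm (d : PySem.Dict Int Int) (l1 l2 : List Int) (h : l1.Perm l2) :
    sumW d l1 = sumW d l2 := (List.Perm.map _ h).sum_eq

lemma fst_mem_keys (c : PySem.Dict Int Int) (p : Int × Int) (hp : p ∈ c.items) : p.1 ∈ c.keys := by
  have h : c.keys = c.items.map (·.1) := by simp [PySem.Dict.keys]
  rw [h]
  exact List.mem_map_of_mem hp

-- the main two-pointer loop invariant
lemma loopA_items (d1 d2 : PySem.Dict Int Int) (k1s k2s cum1 cum2 : List Int) (total1 total2 : Int)
    (hnd1 : d1.keys.Nodup) (hnd2 : d2.keys.Nodup)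
    (hp1 : k1s.Pairwise (· < ·)) (hp2 : k2s.Pairwise (· < ·))
    (hm1 : ∀ k, k ∈ k1s ↔ d1.contains k = true) (hm2 : ∀ k, k ∈ k2s ↔ d2.contains k = true)
    (hc1 : ∀ i : Nat, i ≤ k1s.length → total1 - PySem.List.pyGetD cum1 (i : Int) 0 = sumW d1 (k1s.drop i))
    (hc2 : ∀ i : Nat, i ≤ k2s.length → total2 - PySem.List.pyGetD cum2 (i : Int) 0 = sumW d2 (k2s.drop i)) :
    ∀ (N ix1 ix2 : Nat) (conv : PySem.Dict Int Int),
    (k1s.length - ix1) + (k2s.length - ix2) ≤ N →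
    conv.keys.Nodup →
    (∀ k ∈ conv.keys, (ix1 < k1s.length → k < k1s.getD ix1 0) ∧ (ix2 < k2s.length → k < k2s.getD ix2 0)) →
    (∀ j < ix1, ix2 < k2s.length → k1s.getD j 0 < k2s.getD ix2 0) →
    (∀ j < ix2, ix1 < k1s.length → k2s.getD j 0 < k1s.getD ix1 0) →
    (loopA d1 d2 k1s k2s cum1 cum2 total1 total2 ix1 ix2 conv).items
      = conv.items ++ (mergeOut (k1s.drop ix1) (k2s.drop ix2)).map (fun r => (r, Fraw d1 d2 r)) := by
  have hperm1 : k1s.Perm d1.keys := by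
    rw [List.perm_ext_iff_of_nodup (nodup_of_pairwise_lt _ hp1) hnd1]
    intro a
    rw [hm1 a, PySem.Dict.contains_iff_mem_keys]
  have hperm2 : k2s.Perm d2.keys := by
    rw [List.perm_ext_iff_of_nodup (nodup_of_pairwise_lt _ hp2) hnd2]
    intro a
    rw [hm2 a, PySem.Dict.contains_iff_mem_keys]
  intro N
  induction N with
  | zero =>
    intro ix1 ix2 conv hN _ _ _ _
    have hstop : ¬(ix1 < k1s.length ∧ ix2 < k2s.length) := by omega
    rw [loopA_stop _ _ _ _ _ _ _ _ _ _ _ hstop]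
    have h1 : k1s.drop ix1 = [] := List.drop_eq_nil_of_le (by omega)
    rw [h1, mergeOut, List.map_nil, List.append_nil]
  | succ N ih =>
    intro ix1 ix2 conv hN hnd hconv hx1 hx2
    by_cases hcond : ix1 < k1s.length ∧ ix2 < k2s.length
    · obtain ⟨hi1, hi2⟩ := hcond
      set r1 := k1s.getD ix1 0 with hr1def
      set r2 := k2s.getD ix2 0 with hr2def
      have hr1mem : r1 ∈ k1s := by
        rw [hr1def, List.getD_eq_getElem _ _ hi1]; exact List.getElem_mem _
      have hr2mem : r2 ∈ k2s := by
        rw [hr2def, List.getD_eq_getElem _ _ hi2]; exact List.getElem_mem _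
      have hr1nc : conv.contains r1 = false := by
        apply contains_false_of_not_mem
        intro hmem
        exact absurd ((hconv r1 hmem).1 hi1) (lt_irrefl r1)
      have hr2nc : conv.contains r2 = false := by
        apply contains_false_of_not_mem
        intro hmem
        exact absurd ((hconv r2 hmem).2 hi2) (lt_irrefl r2)
      have hd1 : k1s.drop ix1 = r1 :: k1s.drop (ix1 + 1) := by
        rw [List.drop_eq_getElem_cons hi1, hr1def, List.getD_eq_getElem _ _ hi1]
      have hd2 : k2s.drop ix2 = r2 :: k2s.drop (ix2 + 1) := by
        rw [List.drop_eq_getElem_cons hi2, hr2def, List.getD_eq_getElem _ _ hi2]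
      rcases lt_trichotomy r1 r2 with hlt | heqr | hgt
      · -- r1 < r2 : emit r1
        have hc2false : d2.contains r1 = false := by
          apply contains_false_of_not_mem
          intro hmem
          have hmem2 : r1 ∈ k2s := (hm2 r1).mpr ((PySem.Dict.contains_iff_mem_keys d2 r1).mpr hmem)
          conv at hmem2 => rw [← List.take_append_drop ix2 k2s]
          rcases List.mem_append.mp hmem2 with h | h
          · obtain ⟨j, hj, hji, he⟩ := mem_take_exists k2s ix2 r1 h
            have := hx2 j hji hi1
            omega
          · have := getD_le_of_mem_drop k2s hp2 ix2 hi2 r1 h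
            omega
        have hc1true : d1.contains r1 = true := (hm1 r1).mp hr1mem
        have hfd : k2s.filter (fun k => decide (r1 ≤ k)) = k2s.drop ix2 := by
          apply filter_eq_drop k2s hp2 ix2 hi2 r1
          · intro j hj
            exact hx2 j hj hi1
          · omega
        have hF : Fraw d1 d2 r1 = d1.getD r1 0 * (total2 - PySem.List.pyGetD cum2 (ix2 : Int) 0) := by
          unfold Fraw
          rw [hc1true, hc2false]
          rw [hc2 ix2 (by omega)]
          rw [sumW_perm d2 _ _ ((hperm2.filter _).symm), hfd]
          simp
        have hfresh := modify_fresh conv r1 (d1.getD r1 0 * (total2 - PySem.List.pyGetD cum2 (ix2 : Int) 0)) hnd hr1nc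
        rw [loopA_step_lt _ _ _ _ _ _ _ _ _ _ _ ⟨hi1, hi2⟩ hlt]
        rw [← hr1def]
        have hndapp : (conv.keys ++ [r1]).Nodup := by
          refine List.Nodup.append hnd (List.nodup_singleton r1) ?_
          intro a ha hb
          rw [List.mem_singleton] at hb
          subst hb
          exact absurd ((PySem.Dict.contains_iff_mem_keys conv r1).mpr ha) (by simp [hr1nc])
        rw [ih (ix1 + 1) ix2 _ (by omega) (by rw [hfresh.1]; exact hndapp) ?hcv ?hx1' ?hx2']
        case hcv =>
          intro k hk
          rw [hfresh.1] at hk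
          rcases List.mem_append.mp hk with h | h
          · obtain ⟨ha, hb⟩ := hconv k h
            constructor
            · intro hlen
              exact lt_trans (ha hi1) (getD_lt_getD k1s hp1 ix1 (ix1+1) (by omega) hlen)
            · exact hb
          · rw [List.mem_singleton] at h
            subst h
            constructor
            · intro hlen
              exact getD_lt_getD k1s hp1 ix1 (ix1+1) (by omega) hlen
            · intro _
              exact hlt
        case hx1' =>
          intro j hj hlen
          rcases Nat.lt_or_ge j ix1 with h | h
          · exact hx1 j h hlen
          · have : j = ix1 := by omega
            subst this
            exact hlt
        case hx2' =>
          intro j hj hlen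
          exact lt_trans (hx2 j hj hi1) (getD_lt_getD k1s hp1 ix1 (ix1+1) (by omega) hlen)
        rw [hfresh.2, hd1, hd2, mergeOut, if_pos hlt, ← hd2, List.map_cons, List.append_assoc,
            List.singleton_append, hF]
      · -- r1 = r2 : emit r1, consume both
        have hc1true : d1.contains r1 = true := (hm1 r1).mp hr1mem
        have hc2true : d2.contains r1 = true := by
          rw [heqr]; exact (hm2 r2).mp hr2mem
        have hfd2 : k2s.filter (fun k => decide (r1 ≤ k)) = k2s.drop ix2 := by
          apply filter_eq_drop k2s hp2 ix2 hi2 r1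
          · intro j hj
            exact hx2 j hj hi1
          · omega
        have hfd1 : k1s.filter (fun k => decide (r1 ≤ k)) = k1s.drop ix1 := by
          apply filter_eq_drop k1s hp1 ix1 hi1 r1
          · intro j hj
            exact getD_lt_getD k1s hp1 j ix1 hj hi1
          · omega
        set X1 := d1.getD r1 0 * (total2 - PySem.List.pyGetD cum2 (ix2 : Int) 0) with hX1
        set X2 := (total1 - PySem.List.pyGetD cum1 (ix1 : Int) 0) * d2.getD r2 0 with hX2
        have hF : Fraw d1 d2 r1 = X1 + X2 - d1.getD r1 0 * d2.getD r2 0 := by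
          unfold Fraw
          rw [hc1true, hc2true]
          rw [sumW_perm d2 _ _ ((hperm2.filter _).symm), hfd2]
          rw [sumW_perm d1 _ _ ((hperm1.filter _).symm), hfd1]
          rw [← hc2 ix2 (by omega), ← hc1 ix1 (by omega)]
          rw [hX1, hX2, ← heqr]
          simp
        have hfresh := modify_fresh conv r1 X1 hnd hr1nc
        set cA := conv.modify r1 0 (fun v => v + X1) with hcA
        have hndapp : (conv.keys ++ [r1]).Nodup := by
          refine List.Nodup.append hnd (List.nodup_singleton r1) ?_
          intro a ha hb
          rw [List.mem_singleton] at hb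
          subst hb
          exact absurd ((PySem.Dict.contains_iff_mem_keys conv r1).mpr ha) (by simp [hr1nc])
        have hndA : cA.keys.Nodup := by rw [hfresh.1]; exact hndapp
        have hctA : cA.contains r1 = true := by
          apply (PySem.Dict.contains_iff_mem_keys cA r1).mpr
          rw [hfresh.1]
          exact List.mem_append.mpr (Or.inr (List.mem_singleton.mpr rfl))
        have hpresB := modify_present cA r2 (fun v => v + X2) hndA (by rw [← heqr]; exact hctA)
        set cB := cA.modify r2 0 (fun v => v + X2) with hcB
        have hndB : cB.keys.Nodup := by rw [hpresB.1]; exact hndA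
        have hctB : cB.contains r1 = true := by
          apply (PySem.Dict.contains_iff_mem_keys cB r1).mpr
          rw [hpresB.1]
          exact (PySem.Dict.contains_iff_mem_keys cA r1).mp hctA
        have hpresC := modify_present cB r1 (fun v => v - d1.getD r1 0 * d2.getD r2 0) hndB hctB
        set cC := cB.modify r1 0 (fun v => v - d1.getD r1 0 * d2.getD r2 0) with hcC
        have hfstne : ∀ p ∈ conv.items, p.1 ≠ r1 := by
          intro p hp he
          have := fst_mem_keys conv p hp
          rw [he] at this
          exact absurd ((PySem.Dict.contains_iff_mem_keys conv r1).mpr this) (by simp [hr1nc])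
        have hBitems : cB.items = conv.items ++ [(r1, X1 + X2)] := by
          rw [hpresB.2, hfresh.2, List.map_append]
          congr 1
          · calc conv.items.map (fun p => if p.1 = r2 then (p.1, p.2 + X2) else p)
                = conv.items.map id :=
                  List.map_congr_left (fun p hp => by
                    rw [if_neg (by rw [← heqr] at *; exact hfstne p hp)]; rfl)
              _ = conv.items := List.map_id _
          · rw [← heqr]
            simp
        have hCitems : cC.items = conv.items ++ [(r1, X1 + X2 - d1.getD r1 0 * d2.getD r2 0)] := by
          rw [hpresC.2, hBitems, List.map_append]
          congr 1
          · calc conv.items.map (fun p => if p.1 = r1 then (p.1, p.2 - d1.getD r1 0 * d2.getD r2 0) else p)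
                = conv.items.map id :=
                  List.map_congr_left (fun p hp => by rw [if_neg (hfstne p hp)]; rfl)
              _ = conv.items := List.map_id _
          · simp
        have hkC : cC.keys = conv.keys ++ [r1] := by
          rw [hpresC.1, hpresB.1, hfresh.1]
        have hndC : cC.keys.Nodup := by rw [hkC]; exact hndapp
        rw [loopA_step_eq _ _ _ _ _ _ _ _ _ _ _ ⟨hi1, hi2⟩ heqr]
        rw [← hr1def, ← hr2def, ← hX1, ← hX2, ← hcA, ← hcB, ← hcC]
        rw [ih (ix1 + 1) (ix2 + 1) cC (by omega) hndC ?hcv ?hx1' ?hx2']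
        case hcv =>
          intro k hk
          rw [hkC] at hk
          rcases List.mem_append.mp hk with h | h
          · obtain ⟨ha, hb⟩ := hconv k h
            constructor
            · intro hlen
              exact lt_trans (ha hi1) (getD_lt_getD k1s hp1 ix1 (ix1+1) (by omega) hlen)
            · intro hlen
              exact lt_trans (hb hi2) (getD_lt_getD k2s hp2 ix2 (ix2+1) (by omega) hlen)
          · rw [List.mem_singleton] at h
            subst h
            constructor
            · intro hlen
              exact getD_lt_getD k1s hp1 ix1 (ix1+1) (by omega) hlen
            · intro hlen
              rw [heqr]
              exact getD_lt_getD k2s hp2 ix2 (ix2+1) (by omega) hlen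
        case hx1' =>
          intro j hj hlen
          rcases Nat.lt_or_ge j ix1 with h | h
          · exact lt_trans (hx1 j h hi2) (getD_lt_getD k2s hp2 ix2 (ix2+1) (by omega) hlen)
          · have : j = ix1 := by omega
            subst this
            rw [← hr1def, heqr]
            exact getD_lt_getD k2s hp2 ix2 (ix2+1) (by omega) hlen
        case hx2' =>
          intro j hj hlen
          rcases Nat.lt_or_ge j ix2 with h | h
          · exact lt_trans (hx2 j h hi1) (getD_lt_getD k1s hp1 ix1 (ix1+1) (by omega) hlen)
          · have : j = ix2 := by omega
            subst this
            rw [← hr2def, ← heqr]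
            exact getD_lt_getD k1s hp1 ix1 (ix1+1) (by omega) hlen
        rw [hCitems, hd1, hd2, mergeOut, if_neg (by omega), if_neg (by omega), List.map_cons,
            List.append_assoc, List.singleton_append, hF]
      · -- r2 < r1 : emit r2
        have hc1false : d1.contains r2 = false := by
          apply contains_false_of_not_mem
          intro hmem
          have hmem1 : r2 ∈ k1s := (hm1 r2).mpr ((PySem.Dict.contains_iff_mem_keys d1 r2).mpr hmem)
          conv at hmem1 => rw [← List.take_append_drop ix1 k1s]
          rcases List.mem_append.mp hmem1 with h | h
          · obtain ⟨j, hj, hji, he⟩ := mem_take_exists k1s ix1 r2 h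
            have := hx1 j hji hi2
            omega
          · have := getD_le_of_mem_drop k1s hp1 ix1 hi1 r2 h
            omega
        have hc2true : d2.contains r2 = true := (hm2 r2).mp hr2mem
        have hfd : k1s.filter (fun k => decide (r2 ≤ k)) = k1s.drop ix1 := by
          apply filter_eq_drop k1s hp1 ix1 hi1 r2
          · intro j hj
            exact hx1 j hj hi2
          · omega
        have hF : Fraw d1 d2 r2 = (total1 - PySem.List.pyGetD cum1 (ix1 : Int) 0) * d2.getD r2 0 := by
          unfold Fraw
          rw [hc1false, hc2true]
          rw [hc1 ix1 (by omega)]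
          rw [sumW_perm d1 _ _ ((hperm1.filter _).symm), hfd]
          simp
        have hfresh := modify_fresh conv r2 ((total1 - PySem.List.pyGetD cum1 (ix1 : Int) 0) * d2.getD r2 0) hnd hr2nc
        rw [loopA_step_gt _ _ _ _ _ _ _ _ _ _ _ ⟨hi1, hi2⟩ hgt]
        rw [← hr2def]
        have hndapp : (conv.keys ++ [r2]).Nodup := by
          refine List.Nodup.append hnd (List.nodup_singleton r2) ?_
          intro a ha hb
          rw [List.mem_singleton] at hb
          subst hb
          exact absurd ((PySem.Dict.contains_iff_mem_keys conv r2).mpr ha) (by simp [hr2nc])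
        rw [ih ix1 (ix2 + 1) _ (by omega) (by rw [hfresh.1]; exact hndapp) ?hcv ?hx1' ?hx2']
        case hcv =>
          intro k hk
          rw [hfresh.1] at hk
          rcases List.mem_append.mp hk with h | h
          · obtain ⟨ha, hb⟩ := hconv k h
            constructor
            · exact ha
            · intro hlen
              exact lt_trans (hb hi2) (getD_lt_getD k2s hp2 ix2 (ix2+1) (by omega) hlen)
          · rw [List.mem_singleton] at h
            subst h
            constructor
            · intro _
              exact hgt
            · intro hlen
              exact getD_lt_getD k2s hp2 ix2 (ix2+1) (by omega) hlen
        case hx1' =>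
          intro j hj hlen
          exact lt_trans (hx1 j hj hi2) (getD_lt_getD k2s hp2 ix2 (ix2+1) (by omega) hlen)
        case hx2' =>
          intro j hj hlen
          rcases Nat.lt_or_ge j ix2 with h | h
          · exact hx2 j h hlen
          · have : j = ix2 := by omega
            subst this
            exact hgt
        rw [hfresh.2, hd1, hd2, mergeOut, if_neg (by omega), if_pos hgt, ← hd1, List.map_cons,
            List.append_assoc, List.singleton_append, hF]
    · rw [loopA_stop _ _ _ _ _ _ _ _ _ _ _ hcond]
      rcases Nat.lt_or_ge ix1 k1s.length with h | h
      · have h2 : k2s.drop ix2 = [] := List.drop_eq_nil_of_le (by omega)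
        rw [h2]
        have h3 : ∀ l : List Int, mergeOut l [] = [] := by
          intro l
          cases l with
          | nil => rw [mergeOut]
          | cons a as => rw [mergeOut]
        rw [h3, List.map_nil, List.append_nil]
      · have h1 : k1s.drop ix1 = [] := List.drop_eq_nil_of_le (by omega)
        rw [h1, mergeOut, List.map_nil, List.append_nil]

-- the final `convolved[r] %= MOD` pass
lemma modpass (m : Int) : ∀ (ks : List Int) (c : PySem.Dict Int Int), ks.Nodup →
    (∀ k ∈ ks, c.contains k = true) →
    ((ks.foldl (fun c r => c.modify r 0 (fun v => PySem.Int.mod v m)) c).keys = c.keys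
      ∧ ∀ k, (ks.foldl (fun c r => c.modify r 0 (fun v => PySem.Int.mod v m)) c).getD k 0
          = if k ∈ ks then PySem.Int.mod (c.getD k 0) m else c.getD k 0) := by
  intro ks
  induction ks with
  | nil =>
    intro c _ _
    exact ⟨rfl, fun k => by simp⟩
  | cons r rest ih =>
    intro c hnd hct
    have hr : c.contains r = true := hct r List.mem_cons_self
    have hnd' : rest.Nodup := (List.nodup_cons.mp hnd).2
    have hrn : r ∉ rest := (List.nodup_cons.mp hnd).1
    have hct' : ∀ k ∈ rest, (c.modify r 0 (fun v => PySem.Int.mod v m)).contains k = true := by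
      intro k hk
      rw [PySem.Dict.contains_modify]
      simp [hct k (List.mem_cons_of_mem _ hk)]
    have hkeys : (c.modify r 0 (fun v => PySem.Int.mod v m)).keys = c.keys := by
      rw [PySem.Dict.keys_modify, PySem.Dict.keys_insert_of_contains _ _ hr]
    obtain ⟨ihk, ihv⟩ := ih (c.modify r 0 (fun v => PySem.Int.mod v m)) hnd' hct'
    rw [List.foldl_cons]
    refine ⟨by rw [ihk, hkeys], ?_⟩
    intro k
    rw [ihv k, PySem.Dict.getD_modify]
    by_cases h1 : k ∈ rest
    · have hkr : k ≠ r := fun h => hrn (h ▸ h1)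
      rw [if_pos h1, if_neg hkr, if_pos (List.mem_cons_of_mem _ h1)]
    · by_cases h2 : k = r
      · subst h2
        rw [if_neg h1, if_pos rfl, if_pos List.mem_cons_self]
      · rw [if_neg h1, if_neg h2, if_neg (by simp [h1, h2])]

-- the value accumulated by B's double loop at bucket c
lemma accInner (p1 : Int × Int) : ∀ (l2 : List (Int × Int)) (a : PySem.Dict Int Int) (c : Int),
    (l2.foldl (fun a p2 => a.modify (min p1.1 p2.1) 0 (fun v => v + p1.2 * p2.2)) a).getD c 0
      = a.getD c 0 + ((l2.filter (fun p2 => min p1.1 p2.1 == c)).map (fun p2 => p1.2 * p2.2)).sum := by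
  intro l2
  induction l2 with
  | nil => intro a c; simp
  | cons q t ih =>
    intro a c
    rw [List.foldl_cons, ih]
    by_cases h : min p1.1 q.1 = c
    · rw [List.filter_cons_of_pos (by simp [h]), PySem.Dict.getD_modify, if_pos h.symm,
          List.map_cons, List.sum_cons]
      rw [h]
      ring
    · rw [List.filter_cons_of_neg (by simp [h]), PySem.Dict.getD_modify,
          if_neg (fun hh => h hh.symm)]

lemma accOuter (l2 : List (Int × Int)) : ∀ (l1 : List (Int × Int)) (a : PySem.Dict Int Int) (c : Int),
    (l1.foldl (fun a p1 =>
        l2.foldl (fun a p2 => a.modify (min p1.1 p2.1) 0 (fun v => v + p1.2 * p2.2)) a) a).getD c 0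
      = a.getD c 0
        + (l1.flatMap (fun p1 =>
            (l2.filter (fun p2 => min p1.1 p2.1 == c)).map (fun p2 => p1.2 * p2.2))).sum := by
  intro l1
  induction l1 with
  | nil => intro a c; simp
  | cons q t ih =>
    intro a c
    rw [List.foldl_cons, ih, accInner q l2 a c, List.flatMap_cons, List.sum_append]
    ring

lemma accKeysMem (l2 : List (Int × Int)) : ∀ (l1 : List (Int × Int)) (a : PySem.Dict Int Int) (k : Int),
    (k ∈ (l1.foldl (fun a p1 =>
        l2.foldl (fun a p2 => a.modify (min p1.1 p2.1) 0 (fun v => v + p1.2 * p2.2)) a) a).keys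
      ↔ k ∈ a.keys ∨ ∃ p1 ∈ l1, ∃ p2 ∈ l2, min p1.1 p2.1 = k) := by
  intro l1
  induction l1 with
  | nil => intro a k; simp
  | cons q t ih =>
    intro a k
    rw [List.foldl_cons, ih,
        PySem.Dict.keys_foldl_modify_key l2 (fun p2 => min q.1 p2.1) 0 (fun _ p2 _v => _v + q.2 * p2.2) a,
        PySem.Set.mem_update]
    simp only [List.mem_map, List.mem_cons]
    constructor
    · rintro (⟨h | ⟨p2, hp2, he⟩⟩ | ⟨p1, hp1, p2, hp2, he⟩)
      · exact Or.inl h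
      · exact Or.inr ⟨q, Or.inl rfl, p2, hp2, he⟩
      · exact Or.inr ⟨p1, Or.inr hp1, p2, hp2, he⟩
    · rintro (h | ⟨p1, hp1 | hp1, p2, hp2, he⟩)
      · exact Or.inl (Or.inl h)
      · subst hp1
        exact Or.inl (Or.inr ⟨p2, hp2, he⟩)
      · exact Or.inr ⟨p1, hp1, p2, hp2, he⟩

lemma accKeysNodup (l2 : List (Int × Int)) : ∀ (l1 : List (Int × Int)) (a : PySem.Dict Int Int),
    a.keys.Nodup →
    (l1.foldl (fun a p1 =>
        l2.foldl (fun a p2 => a.modify (min p1.1 p2.1) 0 (fun v => v + p1.2 * p2.2)) a) a).keys.Nodup := by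
  intro l1
  induction l1 with
  | nil => intro a h; exact h
  | cons q t ih =>
    intro a h
    rw [List.foldl_cons]
    exact ih _ (PySem.Dict.nodup_keys_foldl_modify_key l2 (fun p2 => min q.1 p2.1) 0
      (fun _ p2 _v => _v + q.2 * p2.2) a h)

lemma pvInnerSum (d1 d2 : PySem.Dict Int Int) (h2 : d2.keys.Nodup) (r k1 : Int) :
    ((d2.keys.filter (fun k2 => min k1 k2 == r)).map (fun k2 => d1.getD k1 0 * d2.getD k2 0)).sum
    = if k1 = r then d1.getD r 0 * sumW d2 (d2.keys.filter (fun k => r ≤ k))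
      else if r < k1 then d1.getD k1 0 * (if d2.contains r then d2.getD r 0 else 0) else 0 := by
  by_cases h1 : k1 = r
  · subst h1
    rw [if_pos rfl]
    have hcg : d2.keys.filter (fun k2 => min k1 k2 == k1) = d2.keys.filter (fun k => decide (k1 ≤ k)) := by
      apply List.filter_congr
      intro k2 _
      by_cases h : k1 ≤ k2
      · rw [min_eq_left h]
        simp [h]
      · rw [min_eq_right (by omega)]
        have e1 : (k2 == k1) = false := by simp; omega
        have e2 : decide (k1 ≤ k2) = false := by simp; omega
        rw [e1, e2]
    rw [hcg, List.sum_map_mul_left]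
    rfl
  · by_cases hlt : r < k1
    · rw [if_neg h1, if_pos hlt]
      have hcg : d2.keys.filter (fun k2 => min k1 k2 == r) = d2.keys.filter (fun k2 => k2 == r) := by
        apply List.filter_congr
        intro k2 _
        by_cases h : k2 = r
        · subst h; simp; omega
        · simp [h]; omega
      rw [hcg, List.filter_beq]
      by_cases hm : r ∈ d2.keys
      · rw [List.count_eq_one_of_mem h2 hm]
        rw [if_pos ((PySem.Dict.contains_iff_mem_keys d2 r).mpr hm)]
        simp
      · rw [List.count_eq_zero_of_not_mem hm]
        rw [if_neg (by rw [Bool.not_eq_true]; exact contains_false_of_not_mem d2 r hm)]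
        simp
    · rw [if_neg h1, if_neg hlt]
      have hcg : d2.keys.filter (fun k2 => min k1 k2 == r) = [] := by
        rw [List.filter_eq_nil_iff]
        intro k2 _
        simp
        omega
      rw [hcg]
      simp

lemma pvFilterLtSum (d : PySem.Dict Int Int) (r : Int) : ∀ (l : List Int), l.Nodup →
    sumW d (l.filter (fun k => r < k))
      = sumW d (l.filter (fun k => r ≤ k)) - (if r ∈ l then d.getD r 0 else 0) := by
  intro l
  induction l with
  | nil => simp
  | cons k t ih =>
    intro hnd
    have hnd' : t.Nodup := (List.nodup_cons.mp hnd).2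
    have hrn : k ∉ t := (List.nodup_cons.mp hnd).1
    by_cases h1 : k = r
    · subst h1
      rw [List.filter_cons_of_neg (by simp), List.filter_cons_of_pos (by simp), sumW_cons,
          if_pos List.mem_cons_self, ih hnd', if_neg hrn]
      ring
    · have hmm : (r ∈ k :: t) ↔ (r ∈ t) := by
        simp [List.mem_cons]
        intro h; exact absurd h.symm h1
      by_cases h3 : r ∈ t
      all_goals by_cases h2 : r < k
      · rw [List.filter_cons_of_pos (by simp; omega), List.filter_cons_of_pos (by simp; omega),
            sumW_cons, sumW_cons, ih hnd', if_pos h3, if_pos (hmm.mpr h3)]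
        ring
      · rw [List.filter_cons_of_neg (by simp; omega), List.filter_cons_of_neg (by simp; omega),
            ih hnd', if_pos h3, if_pos (hmm.mpr h3)]
      · rw [List.filter_cons_of_pos (by simp; omega), List.filter_cons_of_pos (by simp; omega),
            sumW_cons, sumW_cons, ih hnd', if_neg h3, if_neg (fun h => h3 (hmm.mp h))]
        ring
      · rw [List.filter_cons_of_neg (by simp; omega), List.filter_cons_of_neg (by simp; omega),
            ih hnd', if_neg h3, if_neg (fun h => h3 (hmm.mp h))]

lemma pvOuterSum (d1 d2 : PySem.Dict Int Int) (h2 : d2.keys.Nodup) (r : Int) :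
    ∀ (l : List Int), l.Nodup →
    (l.flatMap (fun k1 =>
        (d2.keys.filter (fun k2 => min k1 k2 == r)).map (fun k2 => d1.getD k1 0 * d2.getD k2 0))).sum
      = (if r ∈ l then d1.getD r 0 * sumW d2 (d2.keys.filter (fun k => r ≤ k)) else 0)
        + (if d2.contains r then d2.getD r 0 else 0) * sumW d1 (l.filter (fun k => r < k)) := by
  intro l
  induction l with
  | nil => simp
  | cons k t ih =>
    intro hnd
    have hnd' : t.Nodup := (List.nodup_cons.mp hnd).2
    have hrn : k ∉ t := (List.nodup_cons.mp hnd).1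
    rw [List.flatMap_cons, List.sum_append, pvInnerSum d1 d2 h2 r k, ih hnd']
    by_cases h1 : k = r
    · subst h1
      rw [if_pos rfl, if_pos List.mem_cons_self, if_neg hrn,
          List.filter_cons_of_neg (by simp)]
      ring
    · have hmm : (r ∈ k :: t) ↔ (r ∈ t) := by
        simp [List.mem_cons]
        intro h; exact absurd h.symm h1
      by_cases h2 : r < k
      · rw [if_neg h1, if_pos h2, List.filter_cons_of_pos (by simp; omega), sumW_cons]
        by_cases h3 : r ∈ t
        · rw [if_pos (hmm.mpr h3), if_pos h3]; ring
        · rw [if_neg (fun h => h3 (hmm.mp h)), if_neg h3]; ring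
      · rw [if_neg h1, if_neg h2, List.filter_cons_of_neg (by simp; omega)]
        by_cases h3 : r ∈ t
        · rw [if_pos (hmm.mpr h3), if_pos h3]; ring
        · rw [if_neg (fun h => h3 (hmm.mp h)), if_neg h3]; ring

-- B's pair sum equals A's accumulated value (pre-mod)
lemma sumPairs_eq_Fraw (d1 d2 : PySem.Dict Int Int) (h1 : d1.keys.Nodup) (h2 : d2.keys.Nodup) (r : Int) :
    (d1.items.flatMap (fun p1 =>
        (d2.items.filter (fun p2 => min p1.1 p2.1 == r)).map (fun p2 => p1.2 * p2.2))).sum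
      = Fraw d1 d2 r := by
  rw [PySem.Dict.items_eq_map_keys d1 h1 0, PySem.Dict.items_eq_map_keys d2 h2 0]
  rw [List.flatMap_map]
  simp only [Function.comp_def, List.filter_map, List.map_map]
  rw [pvOuterSum d1 d2 h2 r d1.keys h1]
  rw [pvFilterLtSum d1 r d1.keys h1]
  unfold Fraw
  by_cases hc1 : d1.contains r = true
  · have hm1 : r ∈ d1.keys := (PySem.Dict.contains_iff_mem_keys d1 r).mp hc1
    by_cases hc2 : d2.contains r = true
    · rw [hc1, hc2, if_pos hm1, if_pos hm1]
      simp only [Bool.and_self, if_true]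
      ring
    · have hc2' : d2.contains r = false := by rcases h : d2.contains r; rfl; exact absurd h hc2
      rw [hc1, hc2', if_pos hm1, if_pos hm1]
      simp
  · have hc1' : d1.contains r = false := by rcases h : d1.contains r; rfl; exact absurd h hc1
    have hm1 : r ∉ d1.keys := fun h => absurd ((PySem.Dict.contains_iff_mem_keys d1 r).mpr h) (by simp [hc1'])
    rw [hc1', if_neg hm1, if_neg hm1]
    by_cases hc2 : d2.contains r = true
    · rw [hc2]
      simp
      ring
    · have hc2' : d2.contains r = false := by rcases h : d2.contains r; rfl; exact absurd h hc2
      rw [hc2']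
      simp

lemma pairwise_lt_of_le_nodup (l : List Int) (h1 : l.Pairwise (· ≤ ·)) (h2 : l.Nodup) :
    l.Pairwise (· < ·) :=
  (h1.and h2).imp (fun h => lt_of_le_of_ne h.1 h.2)

-- ===== VERDICT (by name: the statement is the Claim_ definition above) =====
theorem convolve_roundness_distributions_py_spec : Claim_equal_convolve_roundness_distributions_py := by
  unfold Claim_equal_convolve_roundness_distributions_py
  intro dist1 dist2 _hdom
  unfold Spec_convolve_roundness_distributions_py
  unfold convolve_roundness_distributions_py convolve_roundness_distributions_py_alt
  simp only []
  set d1 := PySem.Dict.ofList dist1 with hd1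
  set d2 := PySem.Dict.ofList dist2 with hd2
  set k1s := PySem.List.sorted d1.keys (fun x => x) with hk1s
  set k2s := PySem.List.sorted d2.keys (fun x => x) with hk2s
  have hnd1 : d1.keys.Nodup := PySem.Dict.nodup_keys_ofList dist1
  have hnd2 : d2.keys.Nodup := PySem.Dict.nodup_keys_ofList dist2
  have hperm1 : k1s.Perm d1.keys := PySem.List.sorted_perm d1.keys (fun x => x) false
  have hperm2 : k2s.Perm d2.keys := PySem.List.sorted_perm d2.keys (fun x => x) false
  have hp1 : k1s.Pairwise (· < ·) :=
    pairwise_lt_of_le_nodup _ (PySem.List.sorted_pairwise d1.keys (fun x => x))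
      (hperm1.symm.nodup hnd1)
  have hp2 : k2s.Pairwise (· < ·) :=
    pairwise_lt_of_le_nodup _ (PySem.List.sorted_pairwise d2.keys (fun x => x))
      (hperm2.symm.nodup hnd2)
  have hm1 : ∀ k, k ∈ k1s ↔ d1.contains k = true := by
    intro k
    rw [hk1s, PySem.List.mem_sorted, PySem.Dict.contains_iff_mem_keys]
  have hm2 : ∀ k, k ∈ k2s ↔ d2.contains k = true := by
    intro k
    rw [hk2s, PySem.List.mem_sorted, PySem.Dict.contains_iff_mem_keys]
  set M := mergeOut k1s k2s with hM
  have hMp : M.Pairwise (· < ·) := mergeOut_pairwise k1s k2s hp1 hp2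
  have hMnd : M.Nodup := nodup_of_pairwise_lt _ hMp
  -- A side: the two-pointer loop produces (r, Fraw r) for r in M
  have hloop := loopA_items d1 d2 k1s k2s (cumArr d1 k1s) (cumArr d2 k2s)
      (PySem.List.pyGetD (cumArr d1 k1s) (-1) 0) (PySem.List.pyGetD (cumArr d2 k2s) (-1) 0)
      hnd1 hnd2 hp1 hp2 hm1 hm2
      (fun i hi => cumArr_suffix d1 k1s i hi)
      (fun i hi => cumArr_suffix d2 k2s i hi)
      (k1s.length + k2s.length) 0 0 PySem.Dict.empty
      (by omega)
      (by rw [PySem.Dict.keys_empty]; exact List.nodup_nil)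
      (by intro k hk; rw [PySem.Dict.keys_empty] at hk; exact absurd hk (List.not_mem_nil))
      (by intro j hj; omega)
      (by intro j hj; omega)
  rw [List.drop_zero, List.drop_zero] at hloop
  set D := loopA d1 d2 k1s k2s (cumArr d1 k1s) (cumArr d2 k2s)
      (PySem.List.pyGetD (cumArr d1 k1s) (-1) 0) (PySem.List.pyGetD (cumArr d2 k2s) (-1) 0)
      0 0 PySem.Dict.empty with hD
  have hDitems : D.items = M.map (fun r => (r, Fraw d1 d2 r)) := by
    rw [hloop]
    rfl
  have hDkeys : D.keys = M := by
    have h : D.keys = D.items.map (·.1) := rfl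
    rw [h, hDitems, List.map_map]
    have h2 : ((·.1) ∘ fun r => (r, Fraw d1 d2 r)) = (id : Int → Int) := rfl
    rw [h2, List.map_id]
  have hDknd : D.keys.Nodup := by rw [hDkeys]; exact hMnd
  have hmp := modpass pyMOD D.keys D hDknd
      (fun k hk => (PySem.Dict.contains_iff_mem_keys D k).mpr hk)
  set R := D.keys.foldl (fun c r => c.modify r 0 (fun v => PySem.Int.mod v pyMOD)) D with hR
  have hRknd : R.keys.Nodup := by rw [hmp.1]; exact hDknd
  have hRitems : R.items = M.map (fun r => (r, PySem.Int.mod (Fraw d1 d2 r) pyMOD)) := by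
    rw [PySem.Dict.items_eq_map_keys R hRknd 0, hmp.1, hDkeys]
    apply List.map_congr_left
    intro r hr
    have hval : D.getD r 0 = Fraw d1 d2 r := by
      apply PySem.Dict.getD_of_mem_items _ _ hDknd
      rw [hDitems]
      exact List.mem_map_of_mem hr
    rw [hmp.2 r, hDkeys, if_pos hr, hval]
  -- B side
  set acc := d1.items.foldl (fun acc p1 =>
      d2.items.foldl (fun acc p2 => acc.modify (min p1.1 p2.1) 0 (fun v => v + p1.2 * p2.2)) acc)
    PySem.Dict.empty with hacc
  set ks := PySem.List.sorted acc.keys (fun x => x) with hks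
  have haccnd : acc.keys.Nodup :=
    accKeysNodup d2.items d1.items PySem.Dict.empty PySem.Dict.nodup_keys_empty
  have hkspm : ks.Perm acc.keys := PySem.List.sorted_perm acc.keys (fun x => x) false
  have hksnd : ks.Nodup := hkspm.symm.nodup haccnd
  have hksp : ks.Pairwise (· < ·) :=
    pairwise_lt_of_le_nodup _ (PySem.List.sorted_pairwise acc.keys (fun x => x)) hksnd
  have hmemks : ∀ k, k ∈ ks ↔ ∃ p1 ∈ d1.items, ∃ p2 ∈ d2.items, min p1.1 p2.1 = k := by
    intro k
    rw [hks, PySem.List.mem_sorted, hacc,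
        accKeysMem d2.items d1.items PySem.Dict.empty k, PySem.Dict.keys_empty]
    simp
  have hkeyeq : M = ks := by
    apply List.Perm.eq_of_pairwise (le := (· < ·))
      (fun a b _ _ h1 h2 => absurd h2 (lt_asymm h1)) hMp hksp
    rw [List.perm_ext_iff_of_nodup hMnd hksnd]
    intro r
    rw [hM, mem_mergeOut k1s k2s r hp1 hp2, hmemks r]
    constructor
    · rintro ⟨a, ha, b, hb, hab⟩
      have ha' : a ∈ d1.keys := hperm1.subset ha
      have hb' : b ∈ d2.keys := hperm2.subset hb
      obtain ⟨p1, hp1, he1⟩ := List.mem_map.mp (show a ∈ d1.items.map (·.1) from ha')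
      obtain ⟨p2, hp2, he2⟩ := List.mem_map.mp (show b ∈ d2.items.map (·.1) from hb')
      exact ⟨p1, hp1, p2, hp2, by rw [he1, he2]; exact hab⟩
    · rintro ⟨p1, hp1, p2, hp2, he⟩
      exact ⟨p1.1, hperm1.mem_iff.mpr (fst_mem_keys d1 p1 hp1), p2.1,
        hperm2.mem_iff.mpr (fst_mem_keys d2 p2 hp2), he⟩
  have hBitems := PySem.Dict.items_foldl_insert_fresh
      (d := PySem.Dict.empty) (l := ks) (k := fun r => r)
      (v := fun r => PySem.Int.mod (acc.getD r 0) pyMOD)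
      (fun r _ => PySem.Dict.contains_empty r) (by simpa using hksnd)
  rw [hBitems, hRitems, hkeyeq]
  rw [show (PySem.Dict.empty : PySem.Dict Int Int).items = [] from rfl, List.nil_append]
  apply List.map_congr_left
  intro r hr
  have hval : acc.getD r 0 = Fraw d1 d2 r := by
    rw [hacc, accOuter d2.items d1.items PySem.Dict.empty r, PySem.Dict.getD_empty, zero_add]
    exact sumPairs_eq_Fraw d1 d2 hnd1 hnd2 r
  simp only [hval]
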